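-- pv_equiv track=rewrite | github.com/NYU-IonyFox/AI-Safety-Lab | frontend/ui_styles.py | tone_for_risk
-- ===== SOURCE A (Python) =====
-- def tone_for_risk(risk_tier: str) -> str:
--     value = str(risk_tier).strip().lower()
--     if any(term in value for term in ("critical", "severe", "high", "unacceptable", "tier_4", "tier_3")):
--         return "tone-red"
--     if any(term in value for term in ("medium", "moderate", "limited", "review", "tier_2")):
--         return "tone-amber"
--     if any(term in value for term in ("low", "minimal", "acceptable", "safe", "tier_1")):
--         return "tone-green"
--     return "tone-blue"
-- ===== SOURCE B (Python) =====
-- _KEYWORD_RANK = [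
--     ("critical", 0), ("severe", 0), ("high", 0), ("unacceptable", 0),
--     ("tier_4", 0), ("tier_3", 0),
--     ("medium", 1), ("moderate", 1), ("limited", 1), ("review", 1), ("tier_2", 1),
--     ("low", 2), ("minimal", 2), ("acceptable", 2), ("safe", 2), ("tier_1", 2),
-- ]
-- _TONES = ("tone-red", "tone-amber", "tone-green", "tone-blue")
--
-- def tone_for_risk(risk_tier: str) -> str:
--     value = str(risk_tier).strip().lower()
--     best = 3
--     for i in range(len(value)):
--         for kw, rank in _KEYWORD_RANK:
--             if rank < best and value.startswith(kw, i):
--                 best = rank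
--     return _TONES[best]
-- ===== Notes on version B (the rewrite author's own statement) =====
-- stated objective: alternative
-- what changed: Instead of A's keyword-driven staged any() substring scans with early returns, B makes a single text-driven pass over the positions of the normalized string, testing prefix matches at each position and maintaining a minimum-severity-rank accumulator, then indexes a tone table with the final rank.
import Mathlib
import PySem

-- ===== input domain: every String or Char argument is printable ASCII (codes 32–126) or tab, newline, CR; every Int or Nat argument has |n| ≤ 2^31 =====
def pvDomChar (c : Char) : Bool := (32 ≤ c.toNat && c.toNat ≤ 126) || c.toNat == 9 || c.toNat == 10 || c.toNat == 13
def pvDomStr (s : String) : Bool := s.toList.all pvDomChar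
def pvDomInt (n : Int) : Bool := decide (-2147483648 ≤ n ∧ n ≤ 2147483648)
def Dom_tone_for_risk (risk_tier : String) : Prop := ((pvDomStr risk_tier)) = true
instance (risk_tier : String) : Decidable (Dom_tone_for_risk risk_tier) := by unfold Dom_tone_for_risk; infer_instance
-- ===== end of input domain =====

-- B replaces A's keyword-driven staged any() substring scans by one text-driven pass over the
-- positions of the normalized string, keeping a minimum-severity-rank accumulator (alternative; same behaviour).
-- ===== PORT A =====
def tone_for_risk (risk_tier : String) : String :=
  let value := PySem.Str.lower (PySem.Str.strip risk_tier)
  if ["critical", "severe", "high", "unacceptable", "tier_4", "tier_3"].any (fun term => PySem.Str.isIn term value) then "tone-red"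
  else if ["medium", "moderate", "limited", "review", "tier_2"].any (fun term => PySem.Str.isIn term value) then "tone-amber"
  else if ["low", "minimal", "acceptable", "safe", "tier_1"].any (fun term => PySem.Str.isIn term value) then "tone-green"
  else "tone-blue"

-- ===== PORT B =====
def kwRanks : List (List Char × Nat) :=
  [("critical".toList, 0), ("severe".toList, 0), ("high".toList, 0), ("unacceptable".toList, 0),
   ("tier_4".toList, 0), ("tier_3".toList, 0),
   ("medium".toList, 1), ("moderate".toList, 1), ("limited".toList, 1), ("review".toList, 1), ("tier_2".toList, 1),
   ("low".toList, 2), ("minimal".toList, 2), ("acceptable".toList, 2), ("safe".toList, 2), ("tier_1".toList, 2)]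

-- inner loop over _KEYWORD_RANK at one text position (suffix s)
def stepBest (s : List Char) (best : Nat) : Nat :=
  kwRanks.foldl (fun b p => if p.2 < b && PySem.Chars.startswith s p.1 then p.2 else b) best

-- outer loop: i over range(len(value)), i.e. over the nonempty suffixes of the text
def scanBest : List Char → Nat → Nat
  | [], best => best
  | c :: rest, best => scanBest rest (stepBest (c :: rest) best)

def tone_for_risk_alt (risk_tier : String) : String :=
  let value := PySem.Str.lower (PySem.Str.strip risk_tier)
  let best := scanBest value.toList 3
  ["tone-red", "tone-amber", "tone-green", "tone-blue"].getD best "tone-blue"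

-- ===== PRECONDITION & SPEC =====
def Spec_tone_for_risk (risk_tier : String) (out : String) : Prop := out = tone_for_risk_alt risk_tier
instance (risk_tier : String) (out : String) : Decidable (Spec_tone_for_risk risk_tier out) := by unfold Spec_tone_for_risk; infer_instance

-- ===== CLAIM =====
def Claim_equal_tone_for_risk : Prop := ∀ (risk_tier : String), Dom_tone_for_risk risk_tier → Spec_tone_for_risk risk_tier (tone_for_risk risk_tier)

-- ===== LEMMAS AND PROOFS =====

-- the inner fold never increases the accumulator
theorem fold_le (xs : List (List Char × Nat)) (s : List Char) (b : Nat) :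
    xs.foldl (fun b p => if p.2 < b && PySem.Chars.startswith s p.1 then p.2 else b) b ≤ b := by
  induction xs generalizing b with
  | nil => simp
  | cons p xs ih =>
      simp only [List.foldl_cons]
      split
      · rename_i h
        simp only [Bool.and_eq_true, decide_eq_true_eq] at h
        exact le_trans (ih p.2) (le_of_lt h.1)
      · exact ih b

theorem scan_le (l : List Char) (b : Nat) : scanBest l b ≤ b := by
  induction l generalizing b with
  | nil => simp [scanBest]
  | cons c rest ih => exact le_trans (ih _) (fold_le _ _ _)

theorem fold_le_of_mem (xs : List (List Char × Nat)) (s : List Char) (b : Nat)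
    (p : List Char × Nat) (hp : p ∈ xs) (hs : PySem.Chars.startswith s p.1 = true) :
    xs.foldl (fun b p => if p.2 < b && PySem.Chars.startswith s p.1 then p.2 else b) b ≤ p.2 := by
  induction xs generalizing b with
  | nil => cases hp
  | cons q xs ih =>
      simp only [List.foldl_cons]
      rcases List.mem_cons.mp hp with h | h
      · subst h
        split
        · exact fold_le _ _ _
        · rename_i hc
          simp only [hs, Bool.and_true, decide_eq_true_eq] at hc
          exact le_trans (fold_le _ _ _) (Nat.le_of_not_lt hc)
      · split
        · exact ih _ h
        · exact ih _ h

theorem scan_le_of_match (l : List Char) (p : List Char × Nat) (hp : p ∈ kwRanks)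
    (j : Nat) (hpre : p.1 <+: l.drop j) (hne : p.1 ≠ []) (b : Nat) :
    scanBest l b ≤ p.2 := by
  induction l generalizing j b with
  | nil =>
      simp only [List.drop_nil] at hpre
      exact absurd (List.prefix_nil.mp hpre) hne
  | cons c rest ih =>
      cases j with
      | zero =>
          have hs : PySem.Chars.startswith (c :: rest) p.1 = true :=
            (PySem.Chars.startswith_iff _ _).mpr (by simpa using hpre)
          have h1 : scanBest (c :: rest) b = scanBest rest (stepBest (c :: rest) b) := rfl
          rw [h1]
          exact le_trans (scan_le rest _) (fold_le_of_mem kwRanks (c :: rest) b p hp hs)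
      | succ j =>
          have h1 : scanBest (c :: rest) b = scanBest rest (stepBest (c :: rest) b) := rfl
          rw [h1]
          exact ih j (by simpa using hpre) _

theorem fold_val (xs : List (List Char × Nat)) (s : List Char) (b : Nat) :
    xs.foldl (fun b p => if p.2 < b && PySem.Chars.startswith s p.1 then p.2 else b) b = b ∨
      ∃ p ∈ xs, xs.foldl (fun b p => if p.2 < b && PySem.Chars.startswith s p.1 then p.2 else b) b = p.2 ∧
        PySem.Chars.startswith s p.1 = true := by
  induction xs generalizing b with
  | nil => left; rfl
  | cons q xs ih =>
      simp only [List.foldl_cons]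
      split
      · rename_i h
        simp only [Bool.and_eq_true, decide_eq_true_eq] at h
        rcases ih q.2 with h1 | ⟨p, hp, h1, h2⟩
        · right; exact ⟨q, List.mem_cons_self, h1, h.2⟩
        · right; exact ⟨p, List.mem_cons_of_mem _ hp, h1, h2⟩
      · rcases ih b with h1 | ⟨p, hp, h1, h2⟩
        · left; exact h1
        · right; exact ⟨p, List.mem_cons_of_mem _ hp, h1, h2⟩

theorem scan_val (l : List Char) (b : Nat) :
    scanBest l b = b ∨ ∃ p ∈ kwRanks, ∃ j, scanBest l b = p.2 ∧ p.1 <+: l.drop j := by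
  induction l generalizing b with
  | nil => left; rfl
  | cons c rest ih =>
      have heq : scanBest (c :: rest) b = scanBest rest (stepBest (c :: rest) b) := rfl
      rw [heq]
      rcases ih (stepBest (c :: rest) b) with h1 | ⟨p, hp, j, h1, h2⟩
      · rcases fold_val kwRanks (c :: rest) b with h2 | ⟨p, hp, h2, h3⟩
        · left; rw [h1]; exact h2
        · right
          exact ⟨p, hp, 0, by rw [h1]; exact h2,
            by simpa using (PySem.Chars.startswith_iff _ _).mp h3⟩
      · right; exact ⟨p, hp, j + 1, h1, by simpa using h2⟩

-- if the scan did not stay at 3, some table keyword occurs in the text and gives the final rank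
theorem match_of_scan (value : String) (hne : scanBest value.toList 3 ≠ 3) :
    ∃ p ∈ kwRanks, scanBest value.toList 3 = p.2 ∧ PySem.Chars.isIn p.1 value.toList = true := by
  rcases scan_val value.toList 3 with h | ⟨p, hp, j, h1, h2⟩
  · exact absurd h hne
  · exact ⟨p, hp, h1, (PySem.Chars.exists_prefix_drop_iff_isIn _ _).mp ⟨j, h2⟩⟩

-- every table rank is ≤ 2
theorem rank_le2 (p : List Char × Nat) (hp : p ∈ kwRanks) : p.2 ≤ 2 := by
  simp only [kwRanks, List.mem_cons, List.not_mem_nil, or_false] at hp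
  rcases hp with rfl|rfl|rfl|rfl|rfl|rfl|rfl|rfl|rfl|rfl|rfl|rfl|rfl|rfl|rfl|rfl <;> simp

-- a table keyword occurring in the text certifies the corresponding group's any()
theorem hit_any (value : String) (p : List Char × Nat) (hp : p ∈ kwRanks)
    (hin : PySem.Chars.isIn p.1 value.toList = true) :
    (p.2 = 0 → ["critical", "severe", "high", "unacceptable", "tier_4", "tier_3"].any (fun term => PySem.Str.isIn term value) = true) ∧
    (p.2 = 1 → ["medium", "moderate", "limited", "review", "tier_2"].any (fun term => PySem.Str.isIn term value) = true) ∧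
    (p.2 = 2 → ["low", "minimal", "acceptable", "safe", "tier_1"].any (fun term => PySem.Str.isIn term value) = true) := by
  simp only [kwRanks, List.mem_cons, List.not_mem_nil, or_false] at hp
  rcases hp with rfl|rfl|rfl|rfl|rfl|rfl|rfl|rfl|rfl|rfl|rfl|rfl|rfl|rfl|rfl|rfl <;>
    refine ⟨fun h => ?_, fun h => ?_, fun h => ?_⟩ <;> simp_all

-- B's output once the scan result is known
theorem alt_eq (risk_tier : String) (n : Nat)
    (h : scanBest (PySem.Str.lower (PySem.Str.strip risk_tier)).toList 3 = n) :
    tone_for_risk_alt risk_tier = List.getD ["tone-red", "tone-amber", "tone-green", "tone-blue"] n "tone-blue" := by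
  simp only [tone_for_risk_alt, h]

-- ===== VERDICT =====
theorem tone_for_risk_spec : Claim_equal_tone_for_risk := by
  intro risk_tier _
  unfold Spec_tone_for_risk
  show tone_for_risk risk_tier = tone_for_risk_alt risk_tier
  rw [tone_for_risk]
  generalize hV : PySem.Str.lower (PySem.Str.strip risk_tier) = value at *
  have key : ∀ (t : String) (r : Nat), (t.toList, r) ∈ kwRanks →
      PySem.Str.isIn t value = true → scanBest value.toList 3 ≤ r := by
    intro t r hmem hin
    have hC : PySem.Chars.isIn t.toList value.toList = true := by simpa using hin
    obtain ⟨j, hj⟩ := (PySem.Chars.exists_prefix_drop_iff_isIn _ _).mpr hC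
    by_cases hne : t.toList = []
    · -- no table keyword is empty
      exfalso
      have := hmem
      simp only [kwRanks, List.mem_cons, List.not_mem_nil, or_false] at this
      rcases this with h|h|h|h|h|h|h|h|h|h|h|h|h|h|h|h <;> (rw [Prod.ext_iff] at h; simp_all)
    · exact scan_le_of_match value.toList (t.toList, r) hmem j hj hne 3
  by_cases hr : ["critical", "severe", "high", "unacceptable", "tier_4", "tier_3"].any (fun term => PySem.Str.isIn term value) = true
  · obtain ⟨t, ht, hin⟩ := List.any_eq_true.mp hr
    have h0 : scanBest value.toList 3 = 0 := by
      have hle : scanBest value.toList 3 ≤ 0 := by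
        fin_cases ht <;> exact key _ 0 (by decide) hin
      omega
    rw [alt_eq _ _ (hV ▸ h0)]
    simp only [hr, if_true]
    rfl
  · by_cases ha : ["medium", "moderate", "limited", "review", "tier_2"].any (fun term => PySem.Str.isIn term value) = true
    · obtain ⟨t, ht, hin⟩ := List.any_eq_true.mp ha
      have hle : scanBest value.toList 3 ≤ 1 := by
        fin_cases ht <;> exact key _ 1 (by decide) hin
      have hne0 : scanBest value.toList 3 ≠ 0 := by
        intro h0
        obtain ⟨p, hp, h1, hin'⟩ := match_of_scan value (by omega)
        exact hr ((hit_any value p hp hin').1 (by omega))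
      have h1 : scanBest value.toList 3 = 1 := by omega
      rw [alt_eq _ _ (hV ▸ h1)]
      simp only [Bool.not_eq_true] at hr
      simp only [hr, ha, if_true, Bool.false_eq_true, if_false]
      rfl
    · by_cases hg : ["low", "minimal", "acceptable", "safe", "tier_1"].any (fun term => PySem.Str.isIn term value) = true
      · obtain ⟨t, ht, hin⟩ := List.any_eq_true.mp hg
        have hle : scanBest value.toList 3 ≤ 2 := by
          fin_cases ht <;> exact key _ 2 (by decide) hin
        have hne0 : scanBest value.toList 3 ≠ 0 ∧ scanBest value.toList 3 ≠ 1 := by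
          constructor <;> intro h0 <;>
            obtain ⟨p, hp, h1, hin'⟩ := match_of_scan value (by omega)
          · exact hr ((hit_any value p hp hin').1 (by omega))
          · exact ha ((hit_any value p hp hin').2.1 (by omega))
        have h2 : scanBest value.toList 3 = 2 := by omega
        rw [alt_eq _ _ (hV ▸ h2)]
        simp only [Bool.not_eq_true] at hr ha
        simp only [hr, ha, hg, if_true, Bool.false_eq_true, if_false]
        rfl
      · have h3 : scanBest value.toList 3 = 3 := by
          by_contra hne
          obtain ⟨p, hp, h1, hin'⟩ := match_of_scan value hne
          have hle2 := rank_le2 p hp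
          have := hit_any value p hp hin'
          interval_cases h : p.2
          · exact hr (this.1 rfl)
          · exact ha (this.2.1 rfl)
          · exact hg (this.2.2 rfl)
        rw [alt_eq _ _ (hV ▸ h3)]
        simp only [Bool.not_eq_true] at hr ha hg
        simp only [hr, ha, hg, Bool.false_eq_true, if_false]
        rfl
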